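-- pv_equiv track=rewrite | github.com/Uchada1124/HedonicGames | partition_utils.py | group_by_symmetries
-- ===== SOURCE A (Python) =====
-- def symmetry(scores):
--     """
--     パーティションのシンメトリーを分類するための一意のキーを作成する。
--
--     :param scores: パーティションのスコアリスト。
--     :return: シンメトリーの分類に使用するためにソートされたスコアのタプル。
--     """
--     return tuple(sorted(scores))
--
-- def group_by_symmetries(partition_scores):
--     """
--     パーティションをシンメトリーのスコアに基づいてグループ化する。
--
--     :param partition_scores: パーティションをキー、スコアを値とする辞書。
--     :return: シンメトリーキー（ソートされたスコアのタプル）をキー、パーティションリストを値とする辞書。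
--     """
--     symmetries_dict = {}
--     for partition, scores in partition_scores.items():
--         key = symmetry(scores)
--         if key not in symmetries_dict:
--             symmetries_dict[key] = []
--         symmetries_dict[key].append(partition)
--     return symmetries_dict
-- ===== SOURCE B (Python) =====
-- def group_by_symmetries(partition_scores):
--     pairs = [(tuple(sorted(scores)), partition)
--              for partition, scores in partition_scores.items()]
--     keys = list(dict.fromkeys(key for key, _ in pairs))
--     return {key: [partition for k, partition in pairs if k == key]
--             for key in keys}
-- ===== Notes on version B (the rewrite author's own statement) =====
-- stated objective: alternative
-- what changed: Replaces A's single-pass mutable-dict bucketing (create-empty-then-append per item) with a two-pass declarative construction: compute each item's symmetry key once into a pairs list, dedup the keys in first-occurrence order, then build the dict by one comprehension that filters the pairs per key.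
import Mathlib
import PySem

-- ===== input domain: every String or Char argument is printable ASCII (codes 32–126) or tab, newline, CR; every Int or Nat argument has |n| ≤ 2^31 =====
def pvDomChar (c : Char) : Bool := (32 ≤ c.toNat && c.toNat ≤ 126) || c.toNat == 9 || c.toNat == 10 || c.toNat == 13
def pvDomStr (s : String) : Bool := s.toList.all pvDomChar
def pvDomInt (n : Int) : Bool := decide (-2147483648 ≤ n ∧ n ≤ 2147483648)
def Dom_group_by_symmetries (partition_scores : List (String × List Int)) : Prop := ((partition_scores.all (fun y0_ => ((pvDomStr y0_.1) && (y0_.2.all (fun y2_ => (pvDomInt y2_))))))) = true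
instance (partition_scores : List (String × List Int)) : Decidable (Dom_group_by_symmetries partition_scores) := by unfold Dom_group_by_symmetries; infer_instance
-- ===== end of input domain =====

-- B replaces A's one-pass mutable-dict bucketing by a two-pass construction (ordered key dedup,
-- then one filtering comprehension per key); objective: alternative (not faster).

-- ===== PORT A =====
-- helper `symmetry` from the module: tuple(sorted(scores)) (the tuple is a List Int here)
def symmetryKey (scores : List Int) : List Int := PySem.List.sorted scores (fun v => v)

def group_by_symmetries (partition_scores : List (String × List Int)) : List (List Int × List String) :=
  (partition_scores.foldl
    (fun d x =>
      let key := symmetryKey x.2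
      let d1 := if d.contains key then d else d.insert key ([] : List String)
      d1.modify key [] (fun v => v ++ [x.1]))
    PySem.Dict.empty).items

-- ===== PORT B =====
def group_by_symmetries_alt (partition_scores : List (String × List Int)) : List (List Int × List String) :=
  let pairs := partition_scores.map (fun x => (symmetryKey x.2, x.1))
  let keys := PySem.List.dedup (pairs.map (fun p => p.1))
  keys.map (fun key =>
    (key, (pairs.filter (fun p => p.1 == key)).map (fun p => p.2)))

-- ===== PRECONDITION & SPEC =====
def Spec_group_by_symmetries (partition_scores : List (String × List Int)) (out : List (List Int × List String)) : Prop := out = group_by_symmetries_alt partition_scores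
instance (partition_scores : List (String × List Int)) (out : List (List Int × List String)) : Decidable (Spec_group_by_symmetries partition_scores out) := by unfold Spec_group_by_symmetries; infer_instance

-- ===== CLAIM (what is proved, stated in full; the proofs are below) =====
def Claim_equal_group_by_symmetries : Prop := ∀ (partition_scores : List (String × List Int)), Dom_group_by_symmetries partition_scores → Spec_group_by_symmetries partition_scores (group_by_symmetries partition_scores)

-- ===== LEMMAS AND PROOFS =====

-- A's "if key missing insert []" followed by append IS a single modify with default []
lemma stepA_eq_modify (d : PySem.Dict (List Int) (List String)) (x : String × List Int) :
    (let key := symmetryKey x.2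
     let d1 := if d.contains key then d else d.insert key ([] : List String)
     d1.modify key [] (fun v => v ++ [x.1]))
    = d.modify (symmetryKey x.2) [] (fun v => v ++ [x.1]) := by
  by_cases h : d.contains (symmetryKey x.2)
  · simp [h]
  · simp only [h, Bool.false_eq_true, if_false, PySem.Dict.modify,
      PySem.Dict.getD_insert_self, PySem.Dict.insert_insert_self,
      PySem.Dict.getD_of_not_contains d ([]:List String) (by simpa using h)]

lemma groupA_eq (ps : List (String × List Int)) :
    group_by_symmetries ps
    = ((ps.map (fun x => (symmetryKey x.2, x.1))).foldl
        (fun d p => d.modify p.1 [] (fun v => v ++ [p.2])) PySem.Dict.empty).items := by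
  unfold group_by_symmetries
  rw [List.foldl_map]
  congr 2
  funext d x
  exact stepA_eq_modify d x

-- ===== VERDICT (by name: the statement is the Claim_ definition above) =====
theorem group_by_symmetries_spec : Claim_equal_group_by_symmetries := by
  intro ps _
  unfold Spec_group_by_symmetries
  show group_by_symmetries ps
    = (PySem.List.dedup ((ps.map (fun x => (symmetryKey x.2, x.1))).map (fun p => p.1))).map
        (fun key => (key,
          ((ps.map (fun x => (symmetryKey x.2, x.1))).filter (fun p => p.1 == key)).map (fun p => p.2)))
  rw [groupA_eq]
  set l := ps.map (fun x => (symmetryKey x.2, x.1)) with hl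
  have hnd : ((l.foldl (fun d p => d.modify p.1 [] (fun v => v ++ [p.2]))
      PySem.Dict.empty)).keys.Nodup := by
    apply PySem.Dict.nodup_keys_foldl_modify_key l (fun p => p.1) [] (fun d p v => v ++ [p.2])
    simp
  rw [PySem.Dict.items_eq_map_keys _ hnd []]
  rw [PySem.Dict.keys_foldl_modify_key l (fun p => p.1) [] (fun d p v => v ++ [p.2])]
  have hkeys : PySem.Set.update (PySem.Dict.empty : PySem.Dict (List Int) (List String)).keys (l.map (fun p => p.1))
      = PySem.List.dedup (l.map (fun p => p.1)) := by
    simp [PySem.Set.update, PySem.Set.ofList, PySem.List.dedup_eq_ofList]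
  rw [hkeys]
  apply List.map_congr_left
  intro k _
  rw [PySem.Dict.getD_foldl_modify_append l PySem.Dict.empty k]
  simp
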